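-- pv_equiv track=rewrite | github.com/Lingyun-Zhou/HBV_scRNAseq | HBV_parsing.py | find_near_barcode
-- ===== SOURCE A (Python) =====
-- def find_near_barcode(barcode, barcode_list, max_distance = 3):
--     near_barcode = {}
--     for i in barcode_list:
--         mis = 0
--         for j in range(len(barcode)):
--             if barcode[j] != i[j]:
--                 mis += 1
--         if mis <= max_distance:
--             if str(mis) in near_barcode:
--                 near_barcode[str(mis)].append(i)
--             else:
--                 near_barcode[str(mis)] = [i]
--     if len(near_barcode) > 0:
--         near_bar = near_barcode[str(sorted([int(i)  for i in near_barcode])[0])][0]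
--         return(near_bar)
--     else:
--         return('')
-- ===== SOURCE B (Python) =====
-- def find_near_barcode(barcode, barcode_list, max_distance = 3):
--     # single pass keeping the best (first, smallest) candidate; best_dist starts
--     # at max_distance + 1 so 'mis < best_dist' also enforces mis <= max_distance
--     best_dist = max_distance + 1
--     best_barcode = ''
--     for i in barcode_list:
--         mis = 0
--         for j in range(len(barcode)):
--             if barcode[j] != i[j]:
--                 mis += 1
--         if mis < best_dist:
--             best_dist = mis
--             best_barcode = i
--     return best_barcode
-- ===== Notes on version B (the rewrite author's own statement) =====
-- stated objective: simpler
-- what changed: Replaced the dict-of-distance-groups built per key str(mis) plus a final sort of parsed int keys by a single pass that keeps the first candidate with the smallest mismatch count (best_dist initialized to max_distance+1).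
import Mathlib
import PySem

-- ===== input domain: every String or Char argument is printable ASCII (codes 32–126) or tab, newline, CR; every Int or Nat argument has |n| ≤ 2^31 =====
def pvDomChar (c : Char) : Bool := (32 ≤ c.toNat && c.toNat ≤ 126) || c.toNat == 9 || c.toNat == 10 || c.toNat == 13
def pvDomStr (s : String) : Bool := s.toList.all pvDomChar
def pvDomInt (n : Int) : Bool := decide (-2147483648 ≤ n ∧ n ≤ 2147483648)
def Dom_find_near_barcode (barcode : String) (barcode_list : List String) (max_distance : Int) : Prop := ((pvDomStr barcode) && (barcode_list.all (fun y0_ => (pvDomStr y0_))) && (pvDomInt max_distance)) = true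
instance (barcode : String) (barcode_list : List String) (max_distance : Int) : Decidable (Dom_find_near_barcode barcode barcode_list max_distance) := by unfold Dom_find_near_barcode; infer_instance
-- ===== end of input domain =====

-- B replaces A's dict-of-distance-groups (keyed by str(mis)) plus a final sort of the
-- parsed integer keys with a single pass keeping the first candidate of smallest mismatch
-- count (objective: simpler).

-- ===== PORT A =====

-- decimal digit list of a Nat, low-level helper for the exact port of str(int) / int(str)
def pvDecChars (n : Nat) : List Char :=
  if _h : n < 10 then [Nat.digitChar n]
  else pvDecChars (n / 10) ++ [Nat.digitChar (n % 10)]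
decreasing_by exact Nat.div_lt_self (by omega) (by omega)

-- str(n) for a Python int: exact (a '-' for negatives, then the decimal digits)
def pvIntStr (n : Int) : String :=
  if n < 0 then String.ofList ('-' :: pvDecChars n.natAbs) else String.ofList (pvDecChars n.toNat)

def pvVal (cs : List Char) : Nat := cs.foldl (fun a c => a * 10 + (c.toNat - 48)) 0

-- int(s): exact on the canonical decimal strings produced by str(int), the only
-- strings this program ever parses (dict keys are always str(mis))
def pvStrInt (s : String) : Int :=
  match s.toList with
  | [] => 0
  | c :: ds => if c = '-' then -(pvVal ds : Int) else (pvVal (c :: ds) : Int)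

-- the inner mismatch loop: for j in range(len(barcode)): if barcode[j] != i[j]: mis += 1
-- (pyGetD default is only reached outside Pre_find_near_barcode, where Python raises IndexError)
def pvMisA (barcode i : String) : Int :=
  (PySem.List.pyRange 0 (PySem.Str.len barcode) 1).foldl
    (fun mis j =>
      if PySem.List.pyGetD barcode.toList j ' ' ≠ PySem.List.pyGetD i.toList j ' ' then mis + 1 else mis) 0

-- one iteration of A's dict-building loop
def pvStepA (barcode : String) (max_distance : Int)
    (d : PySem.Dict String (List String)) (i : String) : PySem.Dict String (List String) :=
  let mis := pvMisA barcode i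
  if mis ≤ max_distance then
    if d.contains (pvIntStr mis) then d.modify (pvIntStr mis) [] (fun l => l ++ [i])
    else d.insert (pvIntStr mis) [i]
  else d

def find_near_barcode (barcode : String) (barcode_list : List String) (max_distance : Int) : String :=
  let near := barcode_list.foldl (pvStepA barcode max_distance) PySem.Dict.empty
  if near.size > 0 then
    let m0 := PySem.List.pyGetD (PySem.List.sorted (near.keys.map pvStrInt) (fun x => x) false) 0 0
    PySem.List.pyGetD (near.getD (pvIntStr m0) []) 0 ""
  else ""

-- ===== PORT B =====

-- B's inner mismatch loop (same text as in Source B)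
def pvMisB (barcode i : String) : Int :=
  (PySem.List.pyRange 0 (PySem.Str.len barcode) 1).foldl
    (fun mis j =>
      if PySem.List.pyGetD barcode.toList j ' ' ≠ PySem.List.pyGetD i.toList j ' ' then mis + 1 else mis) 0

def find_near_barcode_alt (barcode : String) (barcode_list : List String) (max_distance : Int) : String :=
  (barcode_list.foldl
    (fun (st : Int × String) i =>
      let mis := pvMisB barcode i
      if mis < st.1 then (mis, i) else st)
    (max_distance + 1, "")).2

-- ===== PRECONDITION & SPEC =====
-- Pre_ excludes exactly the inputs where A (and B) raise IndexError: a candidate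
-- shorter than barcode is indexed past its end.
def Pre_find_near_barcode (barcode : String) (barcode_list : List String) (max_distance : Int) : Prop :=
  ∀ s ∈ barcode_list, barcode.toList.length ≤ s.toList.length
instance (barcode : String) (barcode_list : List String) (max_distance : Int) : Decidable (Pre_find_near_barcode barcode barcode_list max_distance) := by unfold Pre_find_near_barcode; infer_instance

def pvWitness_find_near_barcode : String × List String × Int := ("AB", (["CC", "AB", "AC"], 1))

def Spec_find_near_barcode (barcode : String) (barcode_list : List String) (max_distance : Int) (out : String) : Prop := out = find_near_barcode_alt barcode barcode_list max_distance
instance (barcode : String) (barcode_list : List String) (max_distance : Int) (out : String) : Decidable (Spec_find_near_barcode barcode barcode_list max_distance out) := by unfold Spec_find_near_barcode; infer_instance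

-- ===== CLAIM (what is proved, stated in full; the proofs are below) =====
def Claim_equal_find_near_barcode : Prop := ∀ (barcode : String) (barcode_list : List String) (max_distance : Int), Dom_find_near_barcode barcode barcode_list max_distance → Pre_find_near_barcode barcode barcode_list max_distance → Spec_find_near_barcode barcode barcode_list max_distance (find_near_barcode barcode barcode_list max_distance)

-- ===== LEMMAS AND PROOFS =====

theorem pvDigitChar_toNat {r : Nat} (h : r < 10) : (Nat.digitChar r).toNat = 48 + r := by
  interval_cases r <;> decide

theorem pvVal_append (cs : List Char) (c : Char) :
    pvVal (cs ++ [c]) = pvVal cs * 10 + (c.toNat - 48) := by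
  simp [pvVal]

theorem pvVal_dec (n : Nat) : pvVal (pvDecChars n) = n := by
  fun_induction pvDecChars n with
  | case1 n h => simp [pvVal, pvDigitChar_toNat h]
  | case2 n h ih =>
    rw [pvVal_append, ih, pvDigitChar_toNat (Nat.mod_lt _ (by omega))]
    omega

theorem pvDec_ne_nil (n : Nat) : pvDecChars n ≠ [] := by
  fun_induction pvDecChars n with
  | case1 n h => simp
  | case2 n h ih => simp

theorem pvDec_head_digit (n : Nat) : ∀ c ∈ (pvDecChars n).head? , c ≠ '-' := by
  fun_induction pvDecChars n with
  | case1 n h =>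
    intro c hc
    simp at hc
    subst hc
    intro he
    have := pvDigitChar_toNat h
    rw [he] at this
    simp at this; omega
  | case2 n h ih =>
    intro c hc
    apply ih
    rwa [List.head?_append_of_ne_nil _ (pvDec_ne_nil _)] at hc

theorem pvRoundtrip (n : Int) : pvStrInt (pvIntStr n) = n := by
  by_cases hneg : n < 0
  · have h1 : pvIntStr n = String.ofList ('-' :: pvDecChars n.natAbs) := by
      rw [pvIntStr, if_pos hneg]
    rw [h1]
    simp [pvStrInt, pvVal_dec]
    rw [abs_of_neg hneg]; ring
  · have h1 : pvIntStr n = String.ofList (pvDecChars n.toNat) := by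
      rw [pvIntStr, if_neg hneg]
    obtain ⟨c, cs, hd⟩ : ∃ c cs, pvDecChars n.toNat = c :: cs := by
      cases h : pvDecChars n.toNat with
      | nil => exact absurd h (pvDec_ne_nil _)
      | cons a b => exact ⟨a, b, rfl⟩
    have hc : c ≠ '-' := pvDec_head_digit n.toNat c (by simp [hd])
    rw [h1, hd]
    simp [pvStrInt, hc]
    rw [← hd, pvVal_dec]
    omega

theorem pvIntStr_inj {a b : Int} (h : pvIntStr a = pvIntStr b) : a = b := by
  have := pvRoundtrip a
  rw [h, pvRoundtrip] at this
  omega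

theorem pvFoldl_le (p : Int → Prop) [DecidablePred p] (l : List Int) : ∀ a : Int,
    a ≤ l.foldl (fun m j => if p j then m + 1 else m) a := by
  induction l with
  | nil => intro a; simp
  | cons x xs ih =>
    intro a
    refine le_trans ?_ (ih (if p x then a + 1 else a))
    split <;> omega

theorem pvMis_nonneg (barcode i : String) : 0 ≤ pvMisA barcode i := by
  unfold pvMisA
  exact pvFoldl_le _ _ 0

-- the loop invariant relating A's dict to B's (best_dist, best_barcode) state
def pvInv (max_distance : Int) (d : PySem.Dict String (List String)) (st : Int × String) : Prop :=
  d.keys.Nodup ∧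
  (∀ k ∈ d.keys, ∃ n : Int, 0 ≤ n ∧ n ≤ max_distance ∧ k = pvIntStr n ∧ st.1 ≤ n) ∧
  ((d.keys = [] ∧ st.1 = max_distance + 1 ∧ st.2 = "") ∨
   (0 ≤ st.1 ∧ st.1 ≤ max_distance ∧ pvIntStr st.1 ∈ d.keys ∧
    (d.getD (pvIntStr st.1) []).headD "" = st.2 ∧ d.getD (pvIntStr st.1) [] ≠ []))

theorem pvInv_step (barcode : String) (max_distance : Int)
    (d : PySem.Dict String (List String)) (st : Int × String) (i : String)
    (h : pvInv max_distance d st) :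
    pvInv max_distance (pvStepA barcode max_distance d i)
      (if pvMisA barcode i < st.1 then (pvMisA barcode i, i) else st) := by
  obtain ⟨hnd, hkeys, hbr⟩ := h
  have hm0 : 0 ≤ pvMisA barcode i := pvMis_nonneg barcode i
  have hst_ub : st.1 ≤ max_distance + 1 := by
    rcases hbr with ⟨_, h1, _⟩ | ⟨_, h1, _⟩ <;> omega
  unfold pvStepA
  by_cases hle : pvMisA barcode i ≤ max_distance
  · rw [if_pos hle]
    by_cases hlt : pvMisA barcode i < st.1
    · rw [if_pos hlt]
      have hnc : ¬ d.contains (pvIntStr (pvMisA barcode i)) = true := by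
        intro hc
        obtain ⟨n, _, _, hkn, hsn⟩ := hkeys _ ((PySem.Dict.contains_iff_mem_keys d _).mp hc)
        have := pvIntStr_inj hkn
        omega
      rw [if_neg hnc]
      refine ⟨PySem.Dict.nodup_keys_insert d _ _ hnd, ?_, Or.inr ?_⟩
      · intro k hk
        rcases (PySem.Dict.mem_keys_insert d _ k _).mp hk with hk | hk
        · exact ⟨pvMisA barcode i, hm0, hle, hk, le_refl _⟩
        · obtain ⟨n, h1, h2, h3, h4⟩ := hkeys k hk
          exact ⟨n, h1, h2, h3, by omega⟩
      · refine ⟨hm0, hle, (PySem.Dict.mem_keys_insert d _ _ _).mpr (Or.inl rfl), ?_, ?_⟩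
        · rw [PySem.Dict.getD_insert, if_pos rfl]; rfl
        · rw [PySem.Dict.getD_insert, if_pos rfl]; simp
    · rw [if_neg hlt]
      have hbr2 : 0 ≤ st.1 ∧ st.1 ≤ max_distance ∧ pvIntStr st.1 ∈ d.keys ∧
          (d.getD (pvIntStr st.1) []).headD "" = st.2 ∧ d.getD (pvIntStr st.1) [] ≠ [] := by
        rcases hbr with ⟨_, h1, _⟩ | h2
        · omega
        · exact h2
      obtain ⟨hs0, hsmd, hsm_mem, hhead, hnil⟩ := hbr2
      by_cases hcon : d.contains (pvIntStr (pvMisA barcode i)) = true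
      · rw [if_pos hcon]
        have hkeq : (d.modify (pvIntStr (pvMisA barcode i)) [] (fun l => l ++ [i])).keys = d.keys := by
          rw [PySem.Dict.keys_modify, PySem.Dict.keys_insert_of_contains _ _ hcon]
        refine ⟨hkeq ▸ hnd, ?_, Or.inr ⟨hs0, hsmd, hkeq ▸ hsm_mem, ?_, ?_⟩⟩
        · intro k hk
          exact hkeys k (hkeq ▸ hk)
        · rw [PySem.Dict.getD_modify]
          split
          · next heq =>
            rw [← heq]
            cases hl : d.getD (pvIntStr st.1) [] with
            | nil => exact absurd hl hnil
            | cons a t => rw [hl] at hhead; simpa using hhead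
          · exact hhead
        · rw [PySem.Dict.getD_modify]
          split
          · next heq => rw [← heq]; simp
          · exact hnil
      · rw [if_neg hcon]
        have hne2 : pvIntStr st.1 ≠ pvIntStr (pvMisA barcode i) := by
          intro he
          exact hcon ((PySem.Dict.contains_iff_mem_keys d _).mpr (he ▸ hsm_mem))
        refine ⟨PySem.Dict.nodup_keys_insert d _ _ hnd, ?_,
          Or.inr ⟨hs0, hsmd, (PySem.Dict.mem_keys_insert d _ _ _).mpr (Or.inr hsm_mem), ?_, ?_⟩⟩
        · intro k hk
          rcases (PySem.Dict.mem_keys_insert d _ k _).mp hk with hk | hk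
          · exact ⟨pvMisA barcode i, hm0, hle, hk, by omega⟩
          · obtain ⟨n, h1, h2, h3, h4⟩ := hkeys k hk
            exact ⟨n, h1, h2, h3, h4⟩
        · rw [PySem.Dict.getD_insert, if_neg hne2]; exact hhead
        · rw [PySem.Dict.getD_insert, if_neg hne2]; exact hnil
  · rw [if_neg hle, if_neg (by omega : ¬ pvMisA barcode i < st.1)]
    exact ⟨hnd, hkeys, hbr⟩

theorem pvInv_foldl (barcode : String) (max_distance : Int) (lst : List String)
    (d : PySem.Dict String (List String)) (st : Int × String) (h : pvInv max_distance d st) :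
    pvInv max_distance (lst.foldl (pvStepA barcode max_distance) d)
      (lst.foldl (fun (st : Int × String) i =>
        let mis := pvMisB barcode i
        if mis < st.1 then (mis, i) else st) st) := by
  induction lst generalizing d st with
  | nil => exact h
  | cons x xs ih =>
    simpa using ih _ _ (pvInv_step barcode max_distance d st x h)

theorem pvExtract (max_distance : Int) (d : PySem.Dict String (List String)) (st : Int × String)
    (h : pvInv max_distance d st) :
    (if d.size > 0 then
      PySem.List.pyGetD (d.getD (pvIntStr (PySem.List.pyGetD
        (PySem.List.sorted (d.keys.map pvStrInt) (fun x => x) false) 0 0)) []) 0 ""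
     else "") = st.2 := by
  obtain ⟨hnd, hkeys, hbr⟩ := h
  have hsize : d.size = d.keys.length := by
    simp [PySem.Dict.size, PySem.Dict.keys]
  rcases hbr with ⟨hk0, _, hs2⟩ | ⟨hs0, hsmd, hsm_mem, hhead, hnil⟩
  · rw [if_neg (by rw [hsize, hk0]; simp)]
    exact hs2.symm
  · rw [if_pos (by rw [hsize]; exact List.length_pos_of_mem hsm_mem)]
    obtain ⟨m0, t, hS⟩ : ∃ m0 t,
        PySem.List.sorted (d.keys.map pvStrInt) (fun x => x) false = m0 :: t := by
      cases hS : PySem.List.sorted (d.keys.map pvStrInt) (fun x => x) false with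
      | nil =>
        rw [PySem.List.sorted_eq_nil_iff] at hS
        simp at hS
        exact absurd hS (by intro he; rw [he] at hsm_mem; simp at hsm_mem)
      | cons a b => exact ⟨a, b, rfl⟩
    rw [hS, PySem.List.pyGetD_zero_cons]
    have hm0_eq : m0 = st.1 := by
      have hle1 : m0 ≤ st.1 := by
        have := PySem.List.key_head_sorted_le (d.keys.map pvStrInt) (fun x => x) hS st.1
          (List.mem_map.mpr ⟨pvIntStr st.1, hsm_mem, pvRoundtrip st.1⟩)
        simpa using this
      have hle2 : st.1 ≤ m0 := by
        have hmem : m0 ∈ d.keys.map pvStrInt := by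
          have := (PySem.List.sorted_perm (d.keys.map pvStrInt) (fun x => x) false).mem_iff.mp
            (by rw [hS]; exact List.mem_cons_self)
          exact this
        obtain ⟨k, hk, hkeq⟩ := List.mem_map.mp hmem
        obtain ⟨n, _, _, hkn, hsn⟩ := hkeys k hk
        rw [← hkeq, hkn, pvRoundtrip]
        exact hsn
      omega
    rw [hm0_eq]
    cases hl : d.getD (pvIntStr st.1) [] with
    | nil => exact absurd hl hnil
    | cons a t' =>
      rw [PySem.List.pyGetD_zero_cons]
      rw [hl] at hhead
      simpa using hhead

-- ===== VERDICT (by name: the statement is the Claim_ definition above) =====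
theorem find_near_barcode_spec : Claim_equal_find_near_barcode := by
  intro barcode barcode_list max_distance _ _
  unfold Spec_find_near_barcode find_near_barcode find_near_barcode_alt
  have h0 : pvInv max_distance PySem.Dict.empty (max_distance + 1, "") := by
    refine ⟨by simp [PySem.Dict.keys_empty], by simp [PySem.Dict.keys_empty], Or.inl ?_⟩
    simp [PySem.Dict.keys_empty]
  exact pvExtract max_distance _ _ (pvInv_foldl barcode max_distance barcode_list _ _ h0)
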